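-- pv_equiv track=rewrite | github.com/nxnode/Code-Challenges | code_challenges/code_wars/strings_mix.py | find_string_differences
-- ===== SOURCE A (Python) =====
-- def create_freq_maps(string_one, string_two):
--     freq_of_chars1 = {}
--     freq_of_chars2 = {}
--
--     for char in string_one:
--         if char.islower():
--             freq_of_chars1[char] = freq_of_chars1.get(char, 0) + 1
--     for char in string_two:
--         if char.islower():
--             freq_of_chars2[char] = freq_of_chars2.get(char, 0) + 1
--     return freq_of_chars1, freq_of_chars2
--
-- def find_string_differences(str1, str2):
--
--     freq_of_chars1, freq_of_chars2 = create_freq_maps(str1, str2)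
--
--     all_chars = set(
--         [key for key in freq_of_chars1 if freq_of_chars1[key] > 1]
--         + [key for key in freq_of_chars2 if freq_of_chars2[key] > 1]
--     )
--     combined_chars = []
--     for char in all_chars:
--         if freq_of_chars1.get(char, 0) > freq_of_chars2.get(char, 0):
--             combined_chars.append(("1", char, freq_of_chars1[char]))
--         elif freq_of_chars1.get(char, 0) < freq_of_chars2.get(char, 0):
--             combined_chars.append(("2", char, freq_of_chars2[char]))
--         else:
--             combined_chars.append(("=", char, freq_of_chars1[char]))
--
--     final_chars = [f"{tup[0]}:{tup[1] * tup[2]}" for tup in combined_chars]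
--     final_chars = sorted(final_chars)
--     final_chars = sorted(final_chars, key=len, reverse=True)
--     final_chars = "/".join(final_chars)
--
--     return final_chars
-- ===== SOURCE B (Python) =====
-- def find_string_differences(str1, str2):
--     def runs(s):
--         # run-length encode the sorted lowercase characters of s
--         chars = sorted(c for c in s if c.islower())
--         out = []
--         i = 0
--         while i < len(chars):
--             j = i
--             while j < len(chars) and chars[j] == chars[i]:
--                 j += 1
--             out.append((chars[i], j - i))
--             i = j
--         return out
--
--     r1, r2 = runs(str1), runs(str2)
--     pieces = []
--     i = j = 0
--     # merge the two sorted run lists, comparing counts per character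
--     while i < len(r1) or j < len(r2):
--         if j >= len(r2) or (i < len(r1) and r1[i][0] < r2[j][0]):
--             ch, c1, c2 = r1[i][0], r1[i][1], 0
--             i += 1
--         elif i >= len(r1) or r2[j][0] < r1[i][0]:
--             ch, c1, c2 = r2[j][0], 0, r2[j][1]
--             j += 1
--         else:
--             ch, c1, c2 = r1[i][0], r1[i][1], r2[j][1]
--             i += 1
--             j += 1
--         m = c1 if c1 >= c2 else c2
--         if m > 1:
--             tag = "1" if c1 > c2 else "2" if c2 > c1 else "="
--             pieces.append(tag + ":" + ch * m)
--     pieces.sort()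
--     pieces.sort(key=len, reverse=True)
--     return "/".join(pieces)
-- ===== Notes on version B (the rewrite author's own statement) =====
-- stated objective: alternative
-- what changed: B replaces A's two hash-map frequency dicts and set-union pipeline by a sort-based algorithm: it run-length-encodes the sorted lowercase characters of each string and then merges the two sorted run lists with a two-pointer scan, emitting each formatted piece during the merge before the same final two-stage sort.
import Mathlib
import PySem

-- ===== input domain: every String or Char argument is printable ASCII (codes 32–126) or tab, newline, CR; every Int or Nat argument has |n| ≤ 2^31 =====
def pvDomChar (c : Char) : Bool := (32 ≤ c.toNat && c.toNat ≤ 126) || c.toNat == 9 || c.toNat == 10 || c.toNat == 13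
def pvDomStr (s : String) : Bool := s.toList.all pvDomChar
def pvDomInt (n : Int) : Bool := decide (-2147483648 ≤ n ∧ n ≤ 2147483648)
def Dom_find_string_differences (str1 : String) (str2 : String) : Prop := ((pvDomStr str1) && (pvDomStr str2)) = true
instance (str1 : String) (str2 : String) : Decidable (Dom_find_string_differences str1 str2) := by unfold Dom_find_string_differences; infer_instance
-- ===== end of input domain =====

-- B replaces A's frequency dicts and set-union pipeline by a sort-based algorithm:
-- run-length encoding of each string's sorted lowercase characters, then a two-pointer
-- merge of the two sorted run lists; same return value.

-- ===== PORT A =====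
-- create_freq_maps, one dict per string (counts as Int)
def pvA_freq (s : List Char) : PySem.Dict Char Int :=
  s.foldl (fun d c => if PySem.Chars.islower c then d.insert c (d.getD c 0 + 1) else d)
    PySem.Dict.empty

-- f"{tup[0]}:{tup[1] * tup[2]}"
def pvA_piece (t : String × Char × Int) : String :=
  t.1 ++ ":" ++ String.ofList (List.replicate t.2.2.toNat t.2.1)

def find_string_differences (str1 : String) (str2 : String) : String :=
  let d1 := pvA_freq str1.toList
  let d2 := pvA_freq str2.toList
  -- Python indexes d[key] inside the comprehension/loop; the key is always present
  -- there (its count is > 1, resp. the branch condition forces presence), so the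
  -- total lookup getD _ 0 returns the same value and no KeyError is reachable.
  let allChars := PySem.Set.ofList
    ((d1.keys.filter (fun k => d1.getD k 0 > 1)) ++ (d2.keys.filter (fun k => d2.getD k 0 > 1)))
  let combined := allChars.foldl (fun acc ch =>
      if d1.getD ch 0 > d2.getD ch 0 then acc ++ [("1", ch, d1.getD ch 0)]
      else if d1.getD ch 0 < d2.getD ch 0 then acc ++ [("2", ch, d2.getD ch 0)]
      else acc ++ [("=", ch, d1.getD ch 0)]) []
  let final := combined.map pvA_piece
  let final1 := PySem.List.sorted final (fun s => s)
  let final2 := PySem.List.sorted final1 (fun s => PySem.Str.len s) true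
  PySem.Str.join "/" final2

-- ===== PORT B =====
-- run-length encoding of a (sorted) character list: the inner i/j span scan,
-- j advances over chars equal to chars[i] (takeWhile), i jumps to j (dropWhile)
def pvB_runs : List Char → List (Char × Int)
  | [] => []
  | c :: t =>
    (c, 1 + ((t.takeWhile (fun d => d == c)).length : Int))
      :: pvB_runs (t.dropWhile (fun d => d == c))
termination_by l => l.length
decreasing_by
  exact Nat.lt_succ_of_le (List.length_dropWhile_le _ _)

-- the merge-loop body after ch/c1/c2 are chosen: m = max, keep if m > 1
def pvB_step (ch : Char) (c1 c2 : Int) : List String :=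
  let m := if c1 ≥ c2 then c1 else c2
  if m > 1 then
    [(if c1 > c2 then "1" else if c2 > c1 then "2" else "=") ++ ":"
       ++ String.ofList (List.replicate m.toNat ch)]
  else []

-- the two-pointer merge over the run lists (indices become structural recursion)
def pvB_merge : List (Char × Int) → List (Char × Int) → List String
  | [], [] => []
  | (c, n) :: t, [] => pvB_step c n 0 ++ pvB_merge t []
  | [], (c, n) :: t => pvB_step c 0 n ++ pvB_merge [] t
  | (c1, n1) :: t1, (c2, n2) :: t2 =>
    if c1 < c2 then pvB_step c1 n1 0 ++ pvB_merge t1 ((c2, n2) :: t2)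
    else if c2 < c1 then pvB_step c2 0 n2 ++ pvB_merge ((c1, n1) :: t1) t2
    else pvB_step c1 n1 n2 ++ pvB_merge t1 t2

def find_string_differences_alt (str1 : String) (str2 : String) : String :=
  let r1 := pvB_runs (PySem.List.sorted (str1.toList.filter PySem.Chars.islower) (fun c => c))
  let r2 := pvB_runs (PySem.List.sorted (str2.toList.filter PySem.Chars.islower) (fun c => c))
  let pieces := pvB_merge r1 r2
  let p1 := PySem.List.sorted pieces (fun s => s)
  let p2 := PySem.List.sorted p1 (fun s => PySem.Str.len s) true
  PySem.Str.join "/" p2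

-- ===== PRECONDITION & SPEC =====
def Spec_find_string_differences (str1 : String) (str2 : String) (out : String) : Prop := out = find_string_differences_alt str1 str2
instance (str1 : String) (str2 : String) (out : String) : Decidable (Spec_find_string_differences str1 str2 out) := by unfold Spec_find_string_differences; infer_instance

-- ===== CLAIM (what is proved, stated in full; the proofs are below) =====
def Claim_equal_find_string_differences : Prop := ∀ (str1 : String) (str2 : String), Dom_find_string_differences str1 str2 → Spec_find_string_differences str1 str2 (find_string_differences str1 str2)

-- ===== LEMMAS AND PROOFS =====

-- proof-side helpers: keys of a run list, value of a key (0 if absent), merged key list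
def pvKeys (r : List (Char × Int)) : List Char := r.map Prod.fst

def pvVal (r : List (Char × Int)) (c : Char) : Int := (List.lookup c r).getD 0

def pvU : List (Char × Int) → List (Char × Int) → List Char
  | [], [] => []
  | (c, _) :: t, [] => c :: pvU t []
  | [], (c, _) :: t => c :: pvU [] t
  | (c1, n1) :: t1, (c2, n2) :: t2 =>
    if c1 < c2 then c1 :: pvU t1 ((c2, n2) :: t2)
    else if c2 < c1 then c2 :: pvU ((c1, n1) :: t1) t2
    else c1 :: pvU t1 t2

-- the old single-piece builder, used as the common map function in the proof
def pvB_piece (ch : Char) (c1 c2 : Int) : String :=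
  (if c1 > c2 then "1" else if c1 < c2 then "2" else "=") ++ ":"
    ++ String.ofList (List.replicate (max c1 c2).toNat ch)

theorem pv_step_eq (ch : Char) (c1 c2 : Int) :
    pvB_step ch c1 c2 = if 1 < max c1 c2 then [pvB_piece ch c1 c2] else [] := by
  simp only [pvB_step, pvB_piece, ge_iff_le]
  rcases lt_trichotomy c1 c2 with h | h | h
  · rw [if_neg (not_le.mpr h), max_eq_right h.le,
      if_neg (by omega : ¬ c1 > c2), if_pos (h : c2 > c1)]
  · subst h
    rw [if_pos le_rfl, max_self,
      if_neg (by omega : ¬ c1 > c1), if_neg (by omega : ¬ c1 > c1)]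
  · rw [if_pos h.le, max_eq_left h.le, if_pos (h : c1 > c2)]

theorem pv_val_not_mem (r : List (Char × Int)) (c : Char) (h : c ∉ pvKeys r) :
    pvVal r c = 0 := by
  unfold pvVal
  rw [List.lookup_eq_none_iff.mpr (fun p hp => by
    simp only [bne_iff_ne, ne_eq]
    intro he
    exact h (List.mem_map.mpr ⟨p, hp, he.symm⟩))]
  rfl

theorem pv_val_cons_ne (c : Char) (n : Int) (t : List (Char × Int)) (x : Char) (h : x ≠ c) :
    pvVal ((c, n) :: t) x = pvVal t x := by
  unfold pvVal
  simp [List.lookup, beq_eq_false_iff_ne.mpr h]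

-- ===== run-length encoding of a sorted list =====

theorem pv_mem_drop {c x : Char} {t : List Char}
    (h : x ∈ t.dropWhile (fun d => d == c)) : x ∈ t :=
  (List.dropWhile_sublist _).mem h

theorem pv_runs_keys_subset : ∀ (l : List Char) (c : Char), c ∈ pvKeys (pvB_runs l) → c ∈ l := by
  intro l
  induction l using pvB_runs.induct with
  | case1 => intro c h; simp [pvB_runs, pvKeys] at h
  | case2 c t ih =>
    intro x h
    rw [pvB_runs] at h
    simp only [pvKeys, List.map_cons, List.mem_cons] at h
    rcases h with h | h
    · simp [h]
    · exact List.mem_cons_of_mem _ (pv_mem_drop (ih x h))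

theorem pv_runs_keys_mem : ∀ (l : List Char), l.Pairwise (· ≤ ·) →
    ∀ c, c ∈ pvKeys (pvB_runs l) ↔ c ∈ l := by
  intro l
  induction l using pvB_runs.induct with
  | case1 => intro _ c; simp [pvB_runs, pvKeys]
  | case2 c t ih =>
    intro hs x
    have hst : t.Pairwise (· ≤ ·) := (List.pairwise_cons.mp hs).2
    have hsd : (t.dropWhile (fun d => d == c)).Pairwise (· ≤ ·) :=
      hst.sublist (List.dropWhile_sublist _)
    rw [pvB_runs]
    simp only [pvKeys, List.map_cons, List.mem_cons]
    rw [show (pvB_runs (t.dropWhile fun d => d == c)).map Prod.fst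
        = pvKeys (pvB_runs (t.dropWhile fun d => d == c)) from rfl, ih hsd x]
    constructor
    · rintro (h | h)
      · exact Or.inl h
      · exact Or.inr (pv_mem_drop h)
    · rintro (h | h)
      · exact Or.inl h
      · by_cases hx : x = c
        · exact Or.inl hx
        · right
          have := List.takeWhile_append_dropWhile (p := fun d => d == c) (l := t)
          rw [← this, List.mem_append] at h
          rcases h with h | h
          · exact absurd (by simpa using List.mem_takeWhile_imp h) hx
          · exact h

-- every element of dropWhile (== c) of a sorted tail of c is strictly greater than c
theorem pv_drop_gt (c : Char) (t : List Char) (hs : (c :: t).Pairwise (· ≤ ·)) :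
    ∀ x ∈ t.dropWhile (fun d => d == c), c < x := by
  intro x hx
  have hle : c ≤ x := (List.pairwise_cons.mp hs).1 x (pv_mem_drop hx)
  rcases eq_or_lt_of_le hle with h | h
  · exfalso
    subst h
    have hst : t.Pairwise (· ≤ ·) := (List.pairwise_cons.mp hs).2
    rcases hd : t.dropWhile (fun d => d == c) with _ | ⟨d, rest⟩
    · rw [hd] at hx; simp at hx
    · have hdne' : d ≠ c := by
        have h9 := List.head?_dropWhile_not (fun d => d == c) t
        rw [hd] at h9
        simpa using h9
      have hdle : c ≤ d := (List.pairwise_cons.mp hs).1 d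
        (pv_mem_drop (by rw [hd]; exact List.mem_cons_self))
      have hdlt : c < d := lt_of_le_of_ne hdle (Ne.symm hdne')
      rw [hd] at hx
      rcases List.mem_cons.mp hx with h | h
      · exact hdne' h.symm
      · have hpd : (d :: rest).Pairwise (· ≤ ·) := by
          rw [← hd]; exact hst.sublist (List.dropWhile_sublist _)
        exact absurd ((List.pairwise_cons.mp hpd).1 c h) (not_le.mpr hdlt)
  · exact h

theorem pv_runs_keys_sorted : ∀ (l : List Char), l.Pairwise (· ≤ ·) →
    (pvKeys (pvB_runs l)).Pairwise (· < ·) := by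
  intro l
  induction l using pvB_runs.induct with
  | case1 => intro _; simp [pvB_runs, pvKeys]
  | case2 c t ih =>
    intro hs
    have hst : t.Pairwise (· ≤ ·) := (List.pairwise_cons.mp hs).2
    have hsd : (t.dropWhile (fun d => d == c)).Pairwise (· ≤ ·) :=
      hst.sublist (List.dropWhile_sublist _)
    rw [pvB_runs]
    simp only [pvKeys, List.map_cons]
    rw [List.pairwise_cons]
    refine ⟨?_, ih hsd⟩
    intro x hx
    exact pv_drop_gt c t hs (x := x)
      (pv_runs_keys_subset _ x hx)

theorem pv_runs_val : ∀ (l : List Char), l.Pairwise (· ≤ ·) →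
    ∀ c, pvVal (pvB_runs l) c = (l.count c : Int) := by
  intro l
  induction l using pvB_runs.induct with
  | case1 => intro _ c; simp [pvB_runs, pvVal, List.lookup]
  | case2 c t ih =>
    intro hs x
    have hst : t.Pairwise (· ≤ ·) := (List.pairwise_cons.mp hs).2
    have hsd : (t.dropWhile (fun d => d == c)).Pairwise (· ≤ ·) :=
      hst.sublist (List.dropWhile_sublist _)
    have hsplit := List.takeWhile_append_dropWhile (p := fun d => d == c) (l := t)
    rw [pvB_runs]
    by_cases hx : x = c
    · subst hx
      unfold pvVal
      rw [List.lookup_cons_self]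
      simp only [Option.getD_some]
      have hall : ∀ b ∈ t.takeWhile (fun d => d == x), x = b := fun b hb =>
        (by simpa using List.mem_takeWhile_imp hb : b = x).symm
      have hct : t.count x = (t.takeWhile (fun d => d == x)).length
          + (t.dropWhile (fun d => d == x)).count x := by
        conv_lhs => rw [← hsplit]
        rw [List.count_append]
        congr 1
        rw [List.count_eq_length]
        intro b hb
        simpa using hall b hb
      have hcd : (t.dropWhile (fun d => d == x)).count x = 0 := by
        rw [List.count_eq_zero]
        intro hmem
        exact absurd rfl (ne_of_gt (pv_drop_gt x t hs x hmem))
      rw [List.count_cons_self, hct, hcd]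
      push_cast
      ring
    · rw [pv_val_cons_ne c _ _ x hx, ih hsd x]
      have : t.count x = (t.dropWhile (fun d => d == c)).count x := by
        conv_lhs => rw [← hsplit]
        rw [List.count_append]
        have : (t.takeWhile (fun d => d == c)).count x = 0 := by
          rw [List.count_eq_zero]
          intro hmem
          exact hx (by simpa using List.mem_takeWhile_imp hmem)
        omega
      rw [List.count_cons_of_ne (fun h9 => hx h9.symm), this]

-- ===== the merged key list =====

theorem pv_U_mem : ∀ (r1 r2 : List (Char × Int)) (c : Char),
    c ∈ pvU r1 r2 ↔ c ∈ pvKeys r1 ∨ c ∈ pvKeys r2 := by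
  intro r1 r2
  induction r1, r2 using pvU.induct with
  | case1 => intro c; simp [pvU, pvKeys]
  | case2 c n t ih =>
    intro x
    rw [pvU, List.mem_cons, ih x]
    simp [pvKeys]
  | case3 c n t ih =>
    intro x
    rw [pvU, List.mem_cons, ih x]
    simp [pvKeys]
  | case4 c1 n1 t1 c2 n2 t2 hlt ih =>
    intro x
    rw [pvU, if_pos hlt, List.mem_cons, ih x]
    simp only [pvKeys, List.map_cons, List.mem_cons]
    tauto
  | case5 c1 n1 t1 c2 n2 t2 hnlt hlt ih =>
    intro x
    rw [pvU, if_neg hnlt, if_pos hlt, List.mem_cons, ih x]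
    simp only [pvKeys, List.map_cons, List.mem_cons]
    tauto
  | case6 c1 n1 t1 c2 n2 t2 hnlt hnlt2 ih =>
    intro x
    have heq : c1 = c2 := le_antisymm (not_lt.mp hnlt2) (not_lt.mp hnlt)
    rw [pvU, if_neg hnlt, if_neg hnlt2, List.mem_cons, ih x]
    simp only [pvKeys, List.map_cons, List.mem_cons, heq]
    tauto

theorem pv_U_sorted : ∀ (r1 r2 : List (Char × Int)),
    (pvKeys r1).Pairwise (· < ·) → (pvKeys r2).Pairwise (· < ·) →
    (pvU r1 r2).Pairwise (· < ·) := by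
  intro r1 r2
  induction r1, r2 using pvU.induct with
  | case1 => intro _ _; simp [pvU]
  | case2 c n t ih =>
    intro h1 _
    rw [pvU, List.pairwise_cons]
    simp only [pvKeys, List.map_cons, List.pairwise_cons] at h1
    refine ⟨?_, ih h1.2 (by simp [pvKeys])⟩
    intro x hx
    rcases (pv_U_mem t [] x).mp hx with h | h
    · exact h1.1 x h
    · simp [pvKeys] at h
  | case3 c n t ih =>
    intro _ h2
    rw [pvU, List.pairwise_cons]
    simp only [pvKeys, List.map_cons, List.pairwise_cons] at h2
    refine ⟨?_, ih (by simp [pvKeys]) h2.2⟩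
    intro x hx
    rcases (pv_U_mem [] t x).mp hx with h | h
    · simp [pvKeys] at h
    · exact h2.1 x h
  | case4 c1 n1 t1 c2 n2 t2 hlt ih =>
    intro h1 h2
    simp only [pvKeys, List.map_cons, List.pairwise_cons] at h1
    rw [pvU, if_pos hlt, List.pairwise_cons]
    refine ⟨?_, ih h1.2 h2⟩
    intro x hx
    rcases (pv_U_mem t1 ((c2, n2) :: t2) x).mp hx with h | h
    · exact h1.1 x h
    · simp only [pvKeys, List.map_cons, List.mem_cons] at h
      rcases h with h | h
      · rw [h]; exact hlt
      · simp only [pvKeys, List.map_cons, List.pairwise_cons] at h2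
        exact lt_trans hlt (h2.1 x h)
  | case5 c1 n1 t1 c2 n2 t2 hnlt hlt ih =>
    intro h1 h2
    simp only [pvKeys, List.map_cons, List.pairwise_cons] at h2
    rw [pvU, if_neg hnlt, if_pos hlt, List.pairwise_cons]
    refine ⟨?_, ih h1 h2.2⟩
    intro x hx
    rcases (pv_U_mem ((c1, n1) :: t1) t2 x).mp hx with h | h
    · simp only [pvKeys, List.map_cons, List.mem_cons] at h
      rcases h with h | h
      · rw [h]; exact hlt
      · simp only [pvKeys, List.map_cons, List.pairwise_cons] at h1
        exact lt_trans hlt (h1.1 x h)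
    · exact h2.1 x h
  | case6 c1 n1 t1 c2 n2 t2 hnlt hnlt2 ih =>
    intro h1 h2
    simp only [pvKeys, List.map_cons, List.pairwise_cons] at h1 h2
    rw [pvU, if_neg hnlt, if_neg hnlt2, List.pairwise_cons]
    refine ⟨?_, ih h1.2 h2.2⟩
    intro x hx
    have heq : c1 = c2 := le_antisymm (not_lt.mp hnlt2) (not_lt.mp hnlt)
    rcases (pv_U_mem t1 t2 x).mp hx with h | h
    · exact h1.1 x h
    · rw [heq]; exact h2.1 x h

theorem pv_flatMap_congr {α β : Type} (L : List α) (f g : α → List β)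
    (h : ∀ x ∈ L, f x = g x) : L.flatMap f = L.flatMap g := by
  induction L with
  | nil => rfl
  | cons a t ih =>
    simp only [List.flatMap_cons]
    rw [h a List.mem_cons_self, ih (fun x hx => h x (List.mem_cons_of_mem a hx))]

-- the merge is the flatMap of pvB_step over the merged key list
theorem pv_merge_eq : ∀ (r1 r2 : List (Char × Int)),
    (pvKeys r1).Pairwise (· < ·) → (pvKeys r2).Pairwise (· < ·) →
    pvB_merge r1 r2 = (pvU r1 r2).flatMap (fun c => pvB_step c (pvVal r1 c) (pvVal r2 c)) := by
  intro r1 r2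
  induction r1, r2 using pvB_merge.induct with
  | case1 => intro _ _; simp [pvB_merge, pvU]
  | case2 c n t ih =>
    intro h1 h2
    simp only [pvKeys, List.map_cons, List.pairwise_cons] at h1
    rw [pvB_merge, pvU, ih h1.2 h2, List.flatMap_cons]
    congr 1
    · unfold pvVal
      rw [List.lookup_cons_self]
      simp [List.lookup]
    · refine pv_flatMap_congr _ _ _ (fun x hx => ?_)
      have hne : x ≠ c := by
        rcases (pv_U_mem t [] x).mp hx with h | h
        · exact ne_of_gt (h1.1 x h)
        · simp [pvKeys] at h
      rw [pv_val_cons_ne c n t x hne]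
  | case3 c n t ih =>
    intro h1 h2
    simp only [pvKeys, List.map_cons, List.pairwise_cons] at h2
    rw [pvB_merge, pvU, ih h1 h2.2, List.flatMap_cons]
    congr 1
    · unfold pvVal
      rw [List.lookup_cons_self]
      simp [List.lookup]
    · refine pv_flatMap_congr _ _ _ (fun x hx => ?_)
      have hne : x ≠ c := by
        rcases (pv_U_mem ([] : List (Char × Int)) t x).mp hx with h | h
        · simp [pvKeys] at h
        · exact ne_of_gt (h2.1 x h)
      rw [pv_val_cons_ne c n t x hne]
  | case4 c1 n1 t1 c2 n2 t2 hlt ih =>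
    intro h1 h2
    simp only [pvKeys, List.map_cons, List.pairwise_cons] at h1
    rw [pvB_merge, if_pos hlt, pvU, if_pos hlt, ih h1.2 h2, List.flatMap_cons]
    have hc2 : c1 ∉ pvKeys ((c2, n2) :: t2) := by
      simp only [pvKeys, List.map_cons, List.mem_cons]
      rintro (h | h)
      · exact absurd h (ne_of_lt hlt)
      · simp only [pvKeys, List.map_cons, List.pairwise_cons] at h2
        exact absurd rfl (ne_of_gt (lt_trans hlt (h2.1 c1 h)))
    congr 1
    · rw [pv_val_not_mem _ _ hc2]
      unfold pvVal
      rw [List.lookup_cons_self]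
      rfl
    · refine pv_flatMap_congr _ _ _ (fun x hx => ?_)
      have hne : x ≠ c1 := by
        rcases (pv_U_mem t1 ((c2, n2) :: t2) x).mp hx with h | h
        · exact ne_of_gt (h1.1 x h)
        · simp only [pvKeys, List.map_cons, List.mem_cons] at h
          rcases h with h | h
          · rw [h]; exact ne_of_gt hlt
          · simp only [pvKeys, List.map_cons, List.pairwise_cons] at h2
            exact ne_of_gt (lt_trans hlt (h2.1 x h))
      rw [pv_val_cons_ne c1 n1 t1 x hne]
  | case5 c1 n1 t1 c2 n2 t2 hnlt hlt ih =>
    intro h1 h2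
    simp only [pvKeys, List.map_cons, List.pairwise_cons] at h2
    rw [pvB_merge, if_neg hnlt, if_pos hlt, pvU, if_neg hnlt, if_pos hlt,
      ih h1 h2.2, List.flatMap_cons]
    have hc1 : c2 ∉ pvKeys ((c1, n1) :: t1) := by
      simp only [pvKeys, List.map_cons, List.mem_cons]
      rintro (h | h)
      · exact absurd h (ne_of_lt hlt)
      · simp only [pvKeys, List.map_cons, List.pairwise_cons] at h1
        exact absurd rfl (ne_of_gt (lt_trans hlt (h1.1 c2 h)))
    congr 1
    · rw [pv_val_not_mem _ _ hc1]
      unfold pvVal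
      rw [List.lookup_cons_self]
      rfl
    · refine pv_flatMap_congr _ _ _ (fun x hx => ?_)
      have hne : x ≠ c2 := by
        rcases (pv_U_mem ((c1, n1) :: t1) t2 x).mp hx with h | h
        · simp only [pvKeys, List.map_cons, List.mem_cons] at h
          rcases h with h | h
          · rw [h]; exact ne_of_gt hlt
          · simp only [pvKeys, List.map_cons, List.pairwise_cons] at h1
            exact ne_of_gt (lt_trans hlt (h1.1 x h))
        · exact ne_of_gt (h2.1 x h)
      rw [pv_val_cons_ne c2 n2 t2 x hne]
  | case6 c1 n1 t1 c2 n2 t2 hnlt hnlt2 ih =>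
    intro h1 h2
    have heq : c1 = c2 := le_antisymm (not_lt.mp hnlt2) (not_lt.mp hnlt)
    simp only [pvKeys, List.map_cons, List.pairwise_cons] at h1 h2
    rw [pvB_merge, if_neg hnlt, if_neg hnlt2, pvU, if_neg hnlt, if_neg hnlt2,
      ih h1.2 h2.2, List.flatMap_cons]
    congr 1
    · unfold pvVal
      rw [List.lookup_cons_self, heq, List.lookup_cons_self]
      rfl
    · refine pv_flatMap_congr _ _ _ (fun x hx => ?_)
      have hne1 : x ≠ c1 := by
        rcases (pv_U_mem t1 t2 x).mp hx with h | h
        · exact ne_of_gt (h1.1 x h)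
        · rw [heq]; exact ne_of_gt (h2.1 x h)
      rw [pv_val_cons_ne c1 n1 t1 x hne1, pv_val_cons_ne c2 n2 t2 x (heq ▸ hne1)]

theorem pv_flatMap_step {α : Type} (L : List α) (P : α → Bool) (G : α → String)
    (f : α → List String) (hf : ∀ x, f x = if P x then [G x] else []) :
    L.flatMap f = (L.filter P).map G := by
  induction L with
  | nil => rfl
  | cons a t ih =>
    simp only [List.flatMap_cons, List.filter_cons, hf a]
    by_cases h : P a = true
    · rw [if_pos h, if_pos h, List.map_cons, ih]; rfl
    · rw [if_neg h, if_neg (by simpa using h), ih]; rfl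

-- ===== A-side lemmas (frequency dicts) =====

theorem pv_freq_eq (s : List Char) :
    pvA_freq s = (s.filter PySem.Chars.islower).foldl
      (fun d c => d.insert c (d.getD c 0 + 1)) PySem.Dict.empty := by
  rw [List.foldl_filter]; rfl

theorem pv_freq_getD (s : List Char) (c : Char) :
    (pvA_freq s).getD c 0 = ((s.filter PySem.Chars.islower).count c : Int) := by
  rw [pv_freq_eq, PySem.Dict.getD_foldl_insert_add_one]
  simp [PySem.Dict.getD, PySem.Dict.get?, PySem.Dict.empty]

theorem pv_freq_getD_lower (s : List Char) (c : Char) (h : PySem.Chars.islower c = true) :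
    (pvA_freq s).getD c 0 = (s.count c : Int) := by
  rw [pv_freq_getD, List.count_filter h]

theorem pv_freq_keys (s : List Char) :
    (pvA_freq s).keys = PySem.Set.ofList (s.filter PySem.Chars.islower) := by
  rw [pv_freq_eq, PySem.Dict.keys_foldl_insert]; rfl

-- membership in A's candidate set
theorem pv_memA (l1 l2 : List Char) (c : Char) :
    (c ∈ PySem.Set.ofList
      (((pvA_freq l1).keys.filter (fun k => (pvA_freq l1).getD k 0 > 1))
        ++ ((pvA_freq l2).keys.filter (fun k => (pvA_freq l2).getD k 0 > 1)))) ↔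
      (PySem.Chars.islower c = true ∧ (1 < l1.count c ∨ 1 < l2.count c)) := by
  rw [PySem.Set.mem_ofList, List.mem_append, List.mem_filter, List.mem_filter,
    pv_freq_keys, pv_freq_keys, PySem.Set.mem_ofList, PySem.Set.mem_ofList,
    List.mem_filter, List.mem_filter]
  constructor
  · rintro (⟨⟨_, hl⟩, hc⟩ | ⟨⟨_, hl⟩, hc⟩) <;>
      rw [pv_freq_getD_lower _ _ hl] at hc
    · exact ⟨hl, Or.inl (by exact_mod_cast of_decide_eq_true hc)⟩
    · exact ⟨hl, Or.inr (by exact_mod_cast of_decide_eq_true hc)⟩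
  · rintro ⟨hl, h1 | h2⟩
    · exact Or.inl ⟨⟨List.count_pos_iff.mp (by omega), hl⟩,
        by rw [pv_freq_getD_lower _ _ hl]; exact decide_eq_true (by exact_mod_cast h1)⟩
    · exact Or.inr ⟨⟨List.count_pos_iff.mp (by omega), hl⟩,
        by rw [pv_freq_getD_lower _ _ hl]; exact decide_eq_true (by exact_mod_cast h2)⟩

-- the two piece builders agree on lowercase characters
theorem pv_piece_eq (l1 l2 : List Char) (c : Char) (hl : PySem.Chars.islower c = true) :
    pvA_piece (if (pvA_freq l1).getD c 0 > (pvA_freq l2).getD c 0 then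
        ("1", c, (pvA_freq l1).getD c 0)
      else if (pvA_freq l1).getD c 0 < (pvA_freq l2).getD c 0 then
        ("2", c, (pvA_freq l2).getD c 0)
      else ("=", c, (pvA_freq l1).getD c 0)) =
      pvB_piece c (l1.count c : Int) (l2.count c : Int) := by
  rw [pv_freq_getD_lower _ _ hl, pv_freq_getD_lower _ _ hl]
  unfold pvB_piece pvA_piece
  rcases lt_trichotomy ((l1.count c : Int)) ((l2.count c : Int)) with h | h | h
  · rw [if_neg (by omega), if_pos h, if_neg (by omega), if_pos h, max_eq_right (le_of_lt h)]
  · rw [if_neg (by omega), if_neg (by omega), if_neg (by omega), if_neg (by omega),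
      max_eq_left (le_of_eq h.symm)]
  · rw [if_pos h, if_pos h, max_eq_left (le_of_lt h)]

-- main theorem, proved over the piece lists
theorem pv_main (str1 str2 : String) :
    find_string_differences str1 str2 = find_string_differences_alt str1 str2 := by
  unfold find_string_differences find_string_differences_alt
  simp only []
  set l1 := str1.toList
  set l2 := str2.toList
  set s1 := PySem.List.sorted (l1.filter PySem.Chars.islower) (fun c => c) with hs1
  set s2 := PySem.List.sorted (l2.filter PySem.Chars.islower) (fun c => c) with hs2
  have hp1 : s1.Pairwise (· ≤ ·) := PySem.List.sorted_pairwise _ _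
  have hp2 : s2.Pairwise (· ≤ ·) := PySem.List.sorted_pairwise _ _
  have hperm1 : s1.Perm (l1.filter PySem.Chars.islower) := PySem.List.sorted_perm _ _ _
  have hperm2 : s2.Perm (l2.filter PySem.Chars.islower) := PySem.List.sorted_perm _ _ _
  have hk1 := pv_runs_keys_sorted s1 hp1
  have hk2 := pv_runs_keys_sorted s2 hp2
  have hv1 : ∀ c, PySem.Chars.islower c = true → pvVal (pvB_runs s1) c = (l1.count c : Int) := by
    intro c hc
    rw [pv_runs_val s1 hp1 c, hperm1.count_eq, List.count_filter hc]
  have hv2 : ∀ c, PySem.Chars.islower c = true → pvVal (pvB_runs s2) c = (l2.count c : Int) := by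
    intro c hc
    rw [pv_runs_val s2 hp2 c, hperm2.count_eq, List.count_filter hc]
  have hUmem : ∀ c, c ∈ pvU (pvB_runs s1) (pvB_runs s2) ↔
      PySem.Chars.islower c = true ∧ (c ∈ l1 ∨ c ∈ l2) := by
    intro c
    rw [pv_U_mem, pv_runs_keys_mem s1 hp1, pv_runs_keys_mem s2 hp2,
      hs1, hs2, PySem.List.mem_sorted, PySem.List.mem_sorted,
      List.mem_filter, List.mem_filter]
    tauto
  have hUlower : ∀ c ∈ pvU (pvB_runs s1) (pvB_runs s2), PySem.Chars.islower c = true :=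
    fun c hc => ((hUmem c).mp hc).1
  have hUnodup : (pvU (pvB_runs s1) (pvB_runs s2)).Nodup :=
    (pv_U_sorted _ _ hk1 hk2).nodup
  set U := pvU (pvB_runs s1) (pvB_runs s2)
  -- B's piece list
  have hB : pvB_merge (pvB_runs s1) (pvB_runs s2)
      = (U.filter (fun c => decide (1 < max ((l1.count c : Int)) ((l2.count c : Int))))).map
          (fun c => pvB_piece c (l1.count c : Int) (l2.count c : Int)) := by
    rw [pv_merge_eq _ _ hk1 hk2]
    rw [pv_flatMap_congr U _
      (fun c => if c ∈ U then pvB_step c (l1.count c : Int) (l2.count c : Int) else [])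
      (fun c hc => by
        simp only [hc, if_true, hv1 c (hUlower c hc), hv2 c (hUlower c hc)])]
    rw [pv_flatMap_congr U _
      (fun c => if decide (1 < max ((l1.count c : Int)) ((l2.count c : Int))) then
          [pvB_piece c (l1.count c : Int) (l2.count c : Int)] else [])
      (fun c hc => by
        simp only [hc, if_true]
        rw [pv_step_eq]
        split_ifs <;> simp_all <;> omega)]
    exact pv_flatMap_step _ _ _ _ (fun x => rfl)
  -- A's piece list (as in the dict-based port)
  set FA : Char → String × Char × Int := fun ch =>
    if (pvA_freq l1).getD ch 0 > (pvA_freq l2).getD ch 0 then ("1", ch, (pvA_freq l1).getD ch 0)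
    else if (pvA_freq l1).getD ch 0 < (pvA_freq l2).getD ch 0 then ("2", ch, (pvA_freq l2).getD ch 0)
    else ("=", ch, (pvA_freq l1).getD ch 0) with hFA
  set SA : List Char := PySem.Set.ofList
    (((pvA_freq l1).keys.filter (fun k => (pvA_freq l1).getD k 0 > 1))
      ++ ((pvA_freq l2).keys.filter (fun k => (pvA_freq l2).getD k 0 > 1))) with hSA
  have hA : SA.foldl (fun acc ch =>
      if (pvA_freq l1).getD ch 0 > (pvA_freq l2).getD ch 0 then acc ++ [("1", ch, (pvA_freq l1).getD ch 0)]
      else if (pvA_freq l1).getD ch 0 < (pvA_freq l2).getD ch 0 then acc ++ [("2", ch, (pvA_freq l2).getD ch 0)]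
      else acc ++ [("=", ch, (pvA_freq l1).getD ch 0)]) [] = SA.map FA := by
    have : (fun (acc : List (String × Char × Int)) ch =>
        if (pvA_freq l1).getD ch 0 > (pvA_freq l2).getD ch 0 then acc ++ [("1", ch, (pvA_freq l1).getD ch 0)]
        else if (pvA_freq l1).getD ch 0 < (pvA_freq l2).getD ch 0 then acc ++ [("2", ch, (pvA_freq l2).getD ch 0)]
        else acc ++ [("=", ch, (pvA_freq l1).getD ch 0)])
        = (fun acc ch => acc ++ [FA ch]) := by
      funext acc ch; simp only [hFA]; split_ifs <;> rfl
    rw [this, PySem.List.foldl_append_singleton_eq_map]; rfl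
  rw [hA, hB]
  set P : Char → Bool := fun c => decide (1 < max ((l1.count c : Int)) ((l2.count c : Int))) with hP
  set G : Char → String := fun c => pvB_piece c (l1.count c : Int) (l2.count c : Int) with hG
  have hperm : (SA.map (pvA_piece ∘ FA)).Perm ((U.filter P).map G) := by
    have hp : SA.Perm (U.filter P) := by
      rw [List.perm_ext_iff_of_nodup (by rw [hSA]; exact PySem.Set.nodup_ofList _)
        (hUnodup.filter _)]
      intro c
      rw [hSA, pv_memA l1 l2 c, List.mem_filter, hUmem c, hP]
      constructor
      · rintro ⟨hl, hc⟩
        have hmem : c ∈ l1 ∨ c ∈ l2 := by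
          rcases hc with h | h <;> [left; right] <;> exact List.count_pos_iff.mp (by omega)
        refine ⟨⟨hl, hmem⟩, decide_eq_true ?_⟩
        rcases hc with h | h
        · exact lt_max_of_lt_left (by exact_mod_cast h)
        · exact lt_max_of_lt_right (by exact_mod_cast h)
      · rintro ⟨⟨hl, _⟩, hc⟩
        refine ⟨hl, ?_⟩
        have := of_decide_eq_true hc
        rcases max_cases ((l1.count c : Int)) ((l2.count c : Int)) with ⟨he, _⟩ | ⟨he, _⟩ <;>
          rw [he] at this <;> [left; right] <;> exact_mod_cast this
    have hfun : ∀ c ∈ U.filter P, (pvA_piece ∘ FA) c = G c := by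
      intro c hc
      have hl : PySem.Chars.islower c = true :=
        hUlower c (List.mem_of_mem_filter hc)
      simp only [Function.comp, hFA, hG]
      exact pv_piece_eq l1 l2 c hl
    calc (SA.map (pvA_piece ∘ FA)).Perm ((U.filter P).map (pvA_piece ∘ FA)) := hp.map _
      _ = (U.filter P).map G := List.map_congr_left hfun
  rw [← List.map_map] at hperm
  rw [PySem.List.sorted_eq_sorted_of_perm _ _ (fun s => s) (fun a b h => h) hperm]

-- ===== VERDICT (by name: the statement is the Claim_ definition above) =====
theorem find_string_differences_spec : Claim_equal_find_string_differences := by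
  intro str1 str2 _
  unfold Spec_find_string_differences
  exact pv_main str1 str2
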